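-- pv_equiv track=rewrite | github.com/wushiwang/LeetCode-Python | 411.minimum-unique-word-abbreviation.python3.py | check
-- ===== SOURCE A (Python) =====
-- def check(word, abbr):
--     i, cur, lst = 0, 0, []
--     while i < len(abbr):
--         if ord(abbr[i]) >= ord('0') and ord(abbr[i]) <= ord('9'):
--             cur *= 10
--             cur += int(abbr[i])
--         else:
--             if cur != 0:
--                 lst.append(cur)
--                 cur = 0
--             lst.append(abbr[i])
--         i += 1
--     if cur != 0:
--         lst.append(cur)
--     i, j = 0, 0
--     while i < len(word) and j < len(lst):
--         if type(lst[j]) is int: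
--             i, j = i+lst[j], j+1
--         else:
--             if word[i] != lst[j]:
--                 return False
--             i, j = i+1, j+1
--     if i == len(word) and j == len(lst):
--         return True
--     return False
-- ===== SOURCE B (Python) =====
-- def check(word, abbr):
--     # Single fused pass: parse digit runs and match letters in one loop,
--     # no intermediate token list.
--     i, j, n, m = 0, 0, len(word), len(abbr)
--     while j < m:
--         c = abbr[j]
--         if '0' <= c <= '9':
--             num = 0
--             while j < m and '0' <= abbr[j] <= '9':
--                 num = num * 10 + (ord(abbr[j]) - ord('0'))
--                 j += 1
--             i += num
--         else:
--             if i >= n or word[i] != c: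
--                 return False
--             i += 1
--             j += 1
--     return i == n
-- ===== Notes on version B (the rewrite author's own statement) =====
-- stated objective: faster
-- what changed: Replaces A's two-phase build-token-list-then-rescan with a single fused two-pointer pass that parses each digit run and matches literals in one loop, with no intermediate token list.
import Mathlib
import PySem

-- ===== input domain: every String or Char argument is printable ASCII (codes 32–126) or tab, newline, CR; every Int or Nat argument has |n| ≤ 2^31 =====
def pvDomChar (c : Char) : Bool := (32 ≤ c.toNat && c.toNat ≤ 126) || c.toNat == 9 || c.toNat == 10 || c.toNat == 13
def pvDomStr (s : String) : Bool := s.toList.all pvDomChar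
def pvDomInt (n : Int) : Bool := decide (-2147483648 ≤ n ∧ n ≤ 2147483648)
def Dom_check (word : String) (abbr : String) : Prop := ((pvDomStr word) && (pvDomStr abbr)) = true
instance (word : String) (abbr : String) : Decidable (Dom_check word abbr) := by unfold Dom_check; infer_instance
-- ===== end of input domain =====

-- B fuses A's tokenize-then-match phases into one two-pointer pass (objective: simpler; same return value).

-- ===== PORT A =====
-- a token of A's intermediate list `lst`: an int or a character
inductive Tok where
  | int : Int → Tok
  | ch : Char → Tok
deriving DecidableEq, Repr

-- A's first loop: scan abbr left to right accumulating `cur`, building `lst`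
def tokA : List Char → Int → List Tok
  | [], cur => if cur ≠ 0 then [Tok.int cur] else []
  | c :: rest, cur =>
    if 48 ≤ c.toNat ∧ c.toNat ≤ 57 then
      tokA rest (cur * 10 + ((c.toNat : Int) - 48))
    else
      (if cur ≠ 0 then [Tok.int cur, Tok.ch c] else [Tok.ch c]) ++ tokA rest 0

-- A's second loop: while i < len(word) and j < len(lst)   (i is always ≥ 0 here,
-- so the pyGet? none branch is unreachable)
def matchA (w : List Char) : Int → List Tok → Bool
  | i, [] => i == (w.length : Int)
  | i, t :: rest =>
    if i < (w.length : Int) then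
      match t with
      | Tok.int n => matchA w (i + n) rest
      | Tok.ch c =>
        match PySem.List.pyGet? w i with
        | some wc => if wc ≠ c then false else matchA w (i + 1) rest
        | none => false
    else false

def check (word : String) (abbr : String) : Bool :=
  matchA word.toList 0 (tokA abbr.toList 0)

-- ===== PORT B =====
-- B's inner while: read a maximal digit run into num
def readRun : List Char → Int → Int × List Char
  | [], num => (num, [])
  | c :: rest, num =>
    if 48 ≤ c.toNat ∧ c.toNat ≤ 57 then
      readRun rest (num * 10 + ((c.toNat : Int) - 48))
    else (num, c :: rest)

theorem readRun_len : ∀ (l : List Char) (num : Int), (readRun l num).2.length ≤ l.length := by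
  intro l
  induction l with
  | nil => intro num; simp [readRun]
  | cons c rest ih =>
    intro num
    simp only [readRun]
    split
    · exact Nat.le_trans (ih _) (Nat.le_succ _)
    · simp

-- B's outer while over abbr with pointer i into word
def loopB (w : List Char) : List Char → Int → Bool
  | [], i => i == (w.length : Int)
  | c :: rest, i =>
    if 48 ≤ c.toNat ∧ c.toNat ≤ 57 then
      let p := readRun rest ((c.toNat : Int) - 48)
      loopB w p.2 (i + p.1)
    else
      if i ≥ (w.length : Int) then false
      else
        match PySem.List.pyGet? w i with
        | some wc => if wc ≠ c then false else loopB w rest (i + 1)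
        | none => false
termination_by l _ => l.length
decreasing_by
  · exact Nat.lt_succ_of_le (readRun_len rest _)
  · simp

def check_alt (word : String) (abbr : String) : Bool :=
  loopB word.toList abbr.toList 0

-- ===== PRECONDITION & SPEC =====
def Spec_check (word : String) (abbr : String) (out : Bool) : Prop := out = check_alt word abbr
instance (word : String) (abbr : String) (out : Bool) : Decidable (Spec_check word abbr out) := by unfold Spec_check; infer_instance

-- ===== CLAIM (what is proved, stated in full; the proofs are below) =====
def Claim_equal_check : Prop := ∀ (word : String) (abbr : String), Dom_check word abbr → Spec_check word abbr (check word abbr)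

-- ===== LEMMAS AND PROOFS =====

-- unfolding loopB one step equals jumping over the whole leading digit run
theorem loopB_readRun (w : List Char) : ∀ (l : List Char) (i : Int),
    loopB w (readRun l 0).2 (i + (readRun l 0).1) = loopB w l i := by
  intro l i
  cases l with
  | nil => simp [readRun]
  | cons c rest =>
    by_cases h : 48 ≤ c.toNat ∧ c.toNat ≤ 57
    · simp only [readRun, loopB, h]
      norm_num
    · simp [readRun, h]

-- core invariant: A's match over the tokens of a partially-consumed digit run
-- equals B's fused loop after jumping by the completed run
theorem tok_match (w : List Char) : ∀ (l : List Char) (cur : Int), 0 ≤ cur → ∀ (i : Int),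
    matchA w i (tokA l cur) = loopB w (readRun l cur).2 (i + (readRun l cur).1) := by
  intro l
  induction l with
  | nil =>
    intro cur hc i
    by_cases h : cur = 0
    · simp [tokA, readRun, matchA, loopB, h]
    · have h1 : 1 ≤ cur := by omega
      simp only [tokA, readRun, h, if_pos, ne_eq, not_false_iff]
      simp only [matchA]
      by_cases hi : i < (w.length : Int)
      · simp [hi, loopB]
      · simp only [hi, if_false, loopB]
        symm
        rw [beq_eq_false_iff_ne]
        omega
  | cons c rest ih =>
    intro cur hc i
    by_cases h : 48 ≤ c.toNat ∧ c.toNat ≤ 57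
    · have hd : (0:Int) ≤ (c.toNat : Int) - 48 := by omega
      simp only [tokA, readRun, h]
      exact ih _ (by omega) i
    · simp only [tokA, readRun, h, if_neg, not_false_iff]
      by_cases h0 : cur = 0
      · subst h0
        simp only [ne_eq, not_true_eq_false, ite_false, List.singleton_append]
        simp only [matchA, loopB, h, if_neg, not_false_iff, add_zero]
        by_cases hi : i < (w.length : Int)
        · have hge : ¬ i ≥ (w.length : Int) := by omega
          simp only [hi, if_pos, hge, ite_false]
          cases hw : PySem.List.pyGet? w i with
          | none => rfl
          | some wc =>
            by_cases hwc : wc = c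
            · simp only [hwc, ne_eq, not_true_eq_false, ite_false]
              have := ih 0 le_rfl (i + 1)
              rw [this, loopB_readRun]
            · simp [hwc]
        · have hge : i ≥ (w.length : Int) := by omega
          simp [hi, hge]
      · have h1 : 1 ≤ cur := by omega
        simp only [h0, ne_eq, not_false_iff, if_pos, List.cons_append]
        simp only [matchA]
        by_cases hi : i < (w.length : Int)
        · simp only [hi, if_pos]
          simp only [loopB, h, if_neg, not_false_iff]
          by_cases hi2 : i + cur < (w.length : Int)
          · have hge : ¬ i + cur ≥ (w.length : Int) := by omega
            simp only [hi2, if_pos, hge, ite_false]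
            cases hw : PySem.List.pyGet? w (i + cur) with
            | none => rfl
            | some wc =>
              by_cases hwc : wc = c
              · simp only [hwc, ne_eq, not_true_eq_false, ite_false]
                have := ih 0 le_rfl (i + cur + 1)
                rw [List.nil_append]
                rw [this, loopB_readRun]
              · simp [hwc]
          · have hge : i + cur ≥ (w.length : Int) := by omega
            simp [hi2, hge]
        · simp only [hi, ite_false]
          simp only [loopB, h, if_neg, not_false_iff]
          have hge : i + cur ≥ (w.length : Int) := by omega
          simp [hge]

-- ===== VERDICT (by name: the statement is the Claim_ definition above) =====
theorem check_spec : Claim_equal_check := by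
  intro word abbr _
  unfold Spec_check check check_alt
  rw [tok_match word.toList abbr.toList 0 le_rfl 0, loopB_readRun]
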